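-- pv_equiv track=rewrite | github.com/francescopeluso/AOC24 | day9/main.py | get_file_positions
-- ===== SOURCE A (Python) =====
-- def get_file_positions(disk):
--   files = []
--   i = 0
--
--   while i < len(disk):
--     if disk[i].isdigit():
--       start = i
--       current_id = disk[i]
--       while i < len(disk) and disk[i].isdigit() and disk[i] == current_id:
--         i += 1
--       files.append((start, i - 1))
--     else:
--       i += 1
--
--   return files
-- ===== SOURCE B (Python) =====
-- def get_file_positions(disk):
--   n = len(disk)
--   starts = [i for i in range(n) if disk[i].isdigit() and (i == 0 or disk[i-1] != disk[i])]
--   ends = [i for i in range(n) if disk[i].isdigit() and (i == n-1 or disk[i+1] != disk[i])]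
--   return list(zip(starts, ends))
-- ===== Notes on version B (the rewrite author's own statement) =====
-- stated objective: alternative
-- what changed: Instead of A's stateful two-pointer scan that walks each run, B detects run boundaries pointwise: two filtered index passes collect all run-start and all run-end positions of digit runs independently, and the answer is their zip.
import Mathlib
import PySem

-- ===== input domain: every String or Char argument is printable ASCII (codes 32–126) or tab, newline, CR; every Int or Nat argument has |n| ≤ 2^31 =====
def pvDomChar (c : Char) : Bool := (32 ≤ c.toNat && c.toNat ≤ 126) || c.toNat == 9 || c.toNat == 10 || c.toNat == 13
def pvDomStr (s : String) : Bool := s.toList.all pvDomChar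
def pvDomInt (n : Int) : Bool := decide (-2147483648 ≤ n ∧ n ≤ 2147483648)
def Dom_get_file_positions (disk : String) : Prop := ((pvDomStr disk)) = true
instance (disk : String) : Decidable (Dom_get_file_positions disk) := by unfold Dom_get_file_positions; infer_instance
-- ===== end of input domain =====

-- B replaces A's stateful run-walking scan by pointwise boundary detection: it collects the
-- run-start indices and the run-end indices in two independent filtered passes and zips them.

-- ===== PORT A =====
-- inner while: consume leading chars d with d.isdigit() and d == current_id; returns run length
def pvRunLen (c : Char) : List Char → Nat
  | [] => 0
  | d :: rest => if PySem.Chars.isdigit d && d == c then pvRunLen c rest + 1 else 0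

-- outer while over the remaining characters, i the current index
-- (fuel = number of characters left at most; it only makes the recursion structural)
def pvAScan : Nat → List Char → Int → List (Int × Int)
  | 0, _, _ => []
  | _ + 1, [], _ => []
  | fuel + 1, c :: rest, i =>
    if PySem.Chars.isdigit c then
      -- start = i, current_id = c; after the inner while i = start + 1 + run, append (start, i-1)
      let n := pvRunLen c rest
      (i, i + n) :: pvAScan fuel (rest.drop n) (i + n + 1)
    else
      pvAScan fuel rest (i + 1)

def get_file_positions (disk : String) : List (Int × Int) := pvAScan disk.toList.length disk.toList 0

-- ===== PORT B =====
-- the comprehension filters; disk[i], disk[i-1], disk[i+1] are always in range where they are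
-- evaluated with effect (the i == 0 / i == n-1 disjunct guards the boundary), so getD is exact
def pvPstart (cs : List Char) (i : Nat) : Bool :=
  PySem.Chars.isdigit (cs.getD i ' ') && (decide (i = 0) || !(cs.getD (i - 1) ' ' == cs.getD i ' '))

def pvPend (cs : List Char) (i : Nat) : Bool :=
  PySem.Chars.isdigit (cs.getD i ' ') && (decide (i = cs.length - 1) || !(cs.getD (i + 1) ' ' == cs.getD i ' '))

def get_file_positions_alt (disk : String) : List (Int × Int) :=
  let cs := disk.toList
  let starts := (List.range cs.length).filter (pvPstart cs)
  let ends := (List.range cs.length).filter (pvPend cs)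
  (starts.zip ends).map (fun p => ((p.1 : Int), (p.2 : Int)))

-- ===== PRECONDITION & SPEC =====
def Spec_get_file_positions (disk : String) (out : List (Int × Int)) : Prop := out = get_file_positions_alt disk
instance (disk : String) (out : List (Int × Int)) : Decidable (Spec_get_file_positions disk out) := by unfold Spec_get_file_positions; infer_instance

-- ===== CLAIM (what is proved, stated in full; the proofs are below) =====
def Claim_equal_get_file_positions : Prop := ∀ (disk : String), Dom_get_file_positions disk → Spec_get_file_positions disk (get_file_positions disk)

-- ===== LEMMAS AND PROOFS =====

-- proof-only recursive characterisations of B's two filters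
-- pvStartsR p cs k: start indices of digit runs of cs (absolute index k), p = char before cs
def pvStartsR (p : Option Char) : List Char → Nat → List Nat
  | [], _ => []
  | c :: rest, k =>
    if PySem.Chars.isdigit c = true ∧ p ≠ some c then k :: pvStartsR (some c) rest (k + 1)
    else pvStartsR (some c) rest (k + 1)

-- pvEndsR cs k: end indices of digit runs of cs (absolute index k)
def pvEndsR : List Char → Nat → List Nat
  | [], _ => []
  | c :: rest, k =>
    if PySem.Chars.isdigit c = true ∧ rest.head? ≠ some c then k :: pvEndsR rest (k + 1)
    else pvEndsR rest (k + 1)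

-- leading count of characters equal to c
def pvCountEq (c : Char) : List Char → Nat
  | [] => 0
  | d :: rest => if d == c then pvCountEq c rest + 1 else 0

theorem pvRunLen_eq_countEq (c : Char) (h : PySem.Chars.isdigit c = true) :
    ∀ cs, pvRunLen c cs = pvCountEq c cs := by
  intro cs
  induction cs with
  | nil => rfl
  | cons d rest ih =>
    by_cases hd : d = c
    · subst hd; simp [pvRunLen, pvCountEq, h, ih]
    · simp [pvRunLen, pvCountEq, hd]

theorem pvCountEq_drop_head (c : Char) :
    ∀ (cs : List Char) (d : Char) (rest : List Char), cs.drop (pvCountEq c cs) = d :: rest → d ≠ c := by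
  intro cs
  induction cs with
  | nil => intro d rest h; simp at h
  | cons e tl ih =>
    intro d rest h
    by_cases he : e = c
    · subst he
      simp [pvCountEq] at h
      exact ih d rest h
    · simp [pvCountEq, he] at h
      obtain ⟨h1, _⟩ := h
      exact h1 ▸ he

theorem pvStartsR_skip (c : Char) :
    ∀ cs k, pvStartsR (some c) cs k = pvStartsR (some c) (cs.drop (pvCountEq c cs)) (k + pvCountEq c cs) := by
  intro cs
  induction cs with
  | nil => intro k; simp [pvCountEq]
  | cons d rest ih =>
    intro k
    by_cases hd : d = c
    · subst hd
      have h1 : pvStartsR (some d) (d :: rest) k = pvStartsR (some d) rest (k + 1) := by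
        simp [pvStartsR]
      rw [h1, ih (k + 1)]
      simp [pvCountEq]
      ring_nf
    · simp [pvCountEq, hd]

theorem pvEndsR_run (c : Char) (h : PySem.Chars.isdigit c = true) :
    ∀ rest k, pvEndsR (c :: rest) k
      = (k + pvCountEq c rest) :: pvEndsR (rest.drop (pvCountEq c rest)) (k + pvCountEq c rest + 1) := by
  intro rest
  induction rest with
  | nil => intro k; simp [pvEndsR, pvCountEq, h]
  | cons d rest' ih =>
    intro k
    by_cases hd : d = c
    · subst hd
      have h1 : pvEndsR (d :: d :: rest') k = pvEndsR (d :: rest') (k + 1) := by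
        simp [pvEndsR]
      rw [h1, ih (k + 1)]
      simp [pvCountEq]
      constructor <;> ring_nf
    · have hne : (d :: rest').head? ≠ some c := by simp [hd]
      have h1 : pvEndsR (c :: d :: rest') k = k :: pvEndsR (d :: rest') (k + 1) := by
        simp [pvEndsR, h, hd]
      rw [h1]
      simp [pvCountEq, hd]

-- main lemma: A's scan equals the zip of the recursive start/end lists
theorem pvAScan_eq_zip : ∀ (n : Nat) (cs : List Char), cs.length ≤ n →
    ∀ (k : Nat) (p : Option Char),
    (∀ c rest, cs = c :: rest → p ≠ some c ∨ PySem.Chars.isdigit c = false) →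
    pvAScan n cs (k : Int)
      = ((pvStartsR p cs k).zip (pvEndsR cs k)).map (fun q => ((q.1 : Int), (q.2 : Int))) := by
  intro n
  induction n with
  | zero =>
    intro cs h k p _
    have : cs = [] := List.eq_nil_of_length_eq_zero (Nat.le_zero.mp h)
    subst this; simp [pvAScan, pvStartsR, pvEndsR]
  | succ n ih =>
    intro cs h k p hp
    cases cs with
    | nil => simp [pvAScan, pvStartsR, pvEndsR]
    | cons c rest =>
      have hlen : rest.length ≤ n := Nat.le_of_succ_le_succ h
      by_cases hd : PySem.Chars.isdigit c = true
      · have hpc : p ≠ some c := by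
          rcases hp c rest rfl with h1 | h1
          · exact h1
          · rw [hd] at h1; exact absurd h1 (by simp)
        have hA : pvAScan (n + 1) (c :: rest) (k : Int)
            = ((k : Int), (k : Int) + pvCountEq c rest) :: pvAScan n (rest.drop (pvCountEq c rest)) ((k : Int) + pvCountEq c rest + 1) := by
          simp only [pvAScan, hd, if_true]
          rw [pvRunLen_eq_countEq c hd]
        have hS : pvStartsR p (c :: rest) k = k :: pvStartsR (some c) (rest.drop (pvCountEq c rest)) (k + 1 + pvCountEq c rest) := by
          simp only [pvStartsR, hd, hpc, ne_eq, not_false_iff, and_self, if_true]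
          rw [pvStartsR_skip c rest (k + 1)]
        have hE := pvEndsR_run c hd rest k
        rw [hA, hS, hE]
        have hdrop : (rest.drop (pvCountEq c rest)).length ≤ n :=
          Nat.le_trans (List.length_drop .. ▸ Nat.sub_le _ _) hlen
        have hp' : ∀ d rest', rest.drop (pvCountEq c rest) = d :: rest' → some c ≠ some d ∨ PySem.Chars.isdigit d = false := by
          intro d rest' hdr
          have hne := pvCountEq_drop_head c rest d rest' hdr
          exact Or.inl (by simp only [ne_eq, Option.some.injEq]; exact fun he => hne he.symm)
        have htail : pvAScan n (rest.drop (pvCountEq c rest)) ((k : Int) + pvCountEq c rest + 1)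
            = ((pvStartsR (some c) (rest.drop (pvCountEq c rest)) (k + 1 + pvCountEq c rest)).zip
                 (pvEndsR (rest.drop (pvCountEq c rest)) (k + pvCountEq c rest + 1))).map
                (fun q => ((q.1 : Int), (q.2 : Int))) := by
          rw [show k + 1 + pvCountEq c rest = k + pvCountEq c rest + 1 by ring]
          rw [show ((k : Int) + pvCountEq c rest + 1) = ((k + pvCountEq c rest + 1 : Nat) : Int) by push_cast; ring]
          exact ih (rest.drop (pvCountEq c rest)) hdrop (k + pvCountEq c rest + 1) (some c) hp'
        simp only [List.zip_cons_cons, List.map_cons]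
        exact congrArg₂ List.cons (by rw [Nat.cast_add]) htail
      · have hd' : PySem.Chars.isdigit c = false := Bool.eq_false_iff.mpr hd
        have hA : pvAScan (n + 1) (c :: rest) (k : Int) = pvAScan n rest ((k : Int) + 1) := by
          simp [pvAScan, hd']
        have hS : pvStartsR p (c :: rest) k = pvStartsR (some c) rest (k + 1) := by
          simp [pvStartsR, hd']
        have hE : pvEndsR (c :: rest) k = pvEndsR rest (k + 1) := by
          simp [pvEndsR, hd']
        rw [hA, hS, hE]
        have hp' : ∀ d rest', rest = d :: rest' → some c ≠ some d ∨ PySem.Chars.isdigit d = false := by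
          intro d rest' hdr
          by_cases hdc : d = c
          · right; rw [hdc]; exact hd'
          · exact Or.inl (by simp only [ne_eq, Option.some.injEq]; exact fun he => hdc he.symm)
        rw [show ((k : Int) + 1) = ((k + 1 : Nat) : Int) by push_cast; ring]
        exact ih rest hlen (k + 1) (some c) hp'

-- bridge: the filtered range comprehension equals the recursive characterisation (starts)
theorem pvStarts_bridge (cs : List Char) :
    ∀ suf k, cs.drop k = suf →
      (List.range' k suf.length).filter (pvPstart cs)
        = pvStartsR (if k = 0 then none else some (cs.getD (k - 1) ' ')) suf k := by
  intro suf
  induction suf with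
  | nil => intro k _; simp [pvStartsR]
  | cons c rest ih =>
    intro k hdr
    have hgetq : cs[k]? = some c := by
      rw [← List.head?_drop, hdr]; rfl
    have hdrop1 : cs.drop (k + 1) = rest := by
      rw [← List.tail_drop, hdr, List.tail_cons]
    have hcond : pvPstart cs k
        = decide (PySem.Chars.isdigit c = true ∧ (if k = 0 then (none : Option Char) else some (cs.getD (k - 1) ' ')) ≠ some c) := by
      by_cases hk : k = 0
      · subst hk
        simp [pvPstart, List.getD, hgetq]
      · simp only [pvPstart, List.getD, hgetq, Option.getD_some, if_neg hk, ne_eq, Option.some.injEq]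
        by_cases hc : cs[k - 1]?.getD ' ' = c <;> by_cases hdig : PySem.Chars.isdigit c = true <;>
          simp [hc, hdig, hk]
    have hprev : (if k + 1 = 0 then (none : Option Char) else some (cs.getD (k + 1 - 1) ' ')) = some c := by
      simp [List.getD, hgetq]
    simp only [List.length_cons]
    rw [List.range'_succ, List.filter_cons, ih (k + 1) hdrop1, hprev]
    simp only [pvStartsR, hcond, decide_eq_true_eq]

-- bridge: the filtered range comprehension equals the recursive characterisation (ends)
theorem pvEnds_bridge (cs : List Char) :
    ∀ suf k, cs.drop k = suf →
      (List.range' k suf.length).filter (pvPend cs) = pvEndsR suf k := by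
  intro suf
  induction suf with
  | nil => intro k _; simp [pvEndsR]
  | cons c rest ih =>
    intro k hdr
    have hgetq : cs[k]? = some c := by
      rw [← List.head?_drop, hdr]; rfl
    have hdrop1 : cs.drop (k + 1) = rest := by
      rw [← List.tail_drop, hdr, List.tail_cons]
    have hklen : cs.length - k = rest.length + 1 := by
      have h2 := congrArg List.length hdr
      simpa using h2
    have hcond : pvPend cs k = decide (PySem.Chars.isdigit c = true ∧ rest.head? ≠ some c) := by
      cases rest with
      | nil =>
        have hdk : (decide (k = cs.length - 1)) = true := by
          simp only [List.length_nil] at hklen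
          simp only [decide_eq_true_eq]
          omega
        simp only [pvPend, List.getD, hgetq, Option.getD_some, hdk, Bool.true_or, List.head?_nil,
          ne_eq, reduceCtorEq, not_false_iff, and_true]
        by_cases hdig : PySem.Chars.isdigit c = true <;> simp [hdig]
      | cons d rest' =>
        have hdk : (decide (k = cs.length - 1)) = false := by
          simp only [List.length_cons] at hklen
          simp only [decide_eq_false_iff_not]
          omega
        have hnextq : cs[k + 1]? = some d := by
          rw [← List.head?_drop, hdrop1]; rfl
        simp only [pvPend, List.getD, hgetq, hnextq, Option.getD_some, hdk, Bool.false_or,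
          List.head?_cons, ne_eq, Option.some.injEq]
        by_cases hc : d = c <;> by_cases hdig : PySem.Chars.isdigit c = true <;>
          simp [hc, hdig]
    simp only [List.length_cons]
    rw [List.range'_succ, List.filter_cons, ih (k + 1) hdrop1]
    simp only [pvEndsR, hcond, decide_eq_true_eq]

-- ===== VERDICT (by name: the statement is the Claim_ definition above) =====
theorem get_file_positions_spec : Claim_equal_get_file_positions := by
  intro disk _
  unfold Spec_get_file_positions get_file_positions get_file_positions_alt
  show pvAScan disk.toList.length disk.toList 0
      = (((List.range disk.toList.length).filter (pvPstart disk.toList)).zip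
          ((List.range disk.toList.length).filter (pvPend disk.toList))).map
          (fun p => ((p.1 : Int), (p.2 : Int)))
  have hs := pvStarts_bridge disk.toList disk.toList 0 rfl
  have he := pvEnds_bridge disk.toList disk.toList 0 rfl
  rw [if_pos rfl] at hs
  rw [List.range_eq_range', hs, he]
  have hmain := pvAScan_eq_zip disk.toList.length disk.toList (Nat.le_refl _) 0 none
    (fun c rest _ => Or.inl (by simp))
  simpa using hmain
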